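-- pv_equiv track=rewrite | github.com/siapy/siapy-lib | siapy/utils/general.py | get_increasing_seq_indices
-- ===== SOURCE A (Python) =====
-- def get_increasing_seq_indices(values_list: list[int]) -> list[int]:
--     indices = []
--     last_value = 0
--     for idx, value in enumerate(values_list):
--         if value > last_value:
--             last_value = value
--             indices.append(idx)
--     return indices
-- ===== SOURCE B (Python) =====
-- def get_increasing_seq_indices(values_list: list[int]) -> list[int]:
--     # Pass 1: table of the running maximum of 0 and all elements strictly before each index.
--     prefix_max = []
--     m = 0
--     for v in values_list:
--         prefix_max.append(m)
--         m = max(m, v)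
--     # Pass 2: select the indices whose value strictly exceeds that prefix maximum.
--     return [i for i, (v, p) in enumerate(zip(values_list, prefix_max)) if v > p]
-- ===== Notes on version B (the rewrite author's own statement) =====
-- stated objective: idiomatic
-- what changed: Replaces the single fused loop with mutable last_value by a two-pass decomposition: first build an exclusive prefix-maximum table (seeded with 0), then a comprehension over enumerate(zip(...)) selects the indices whose value strictly exceeds its prefix maximum.
import Mathlib
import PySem

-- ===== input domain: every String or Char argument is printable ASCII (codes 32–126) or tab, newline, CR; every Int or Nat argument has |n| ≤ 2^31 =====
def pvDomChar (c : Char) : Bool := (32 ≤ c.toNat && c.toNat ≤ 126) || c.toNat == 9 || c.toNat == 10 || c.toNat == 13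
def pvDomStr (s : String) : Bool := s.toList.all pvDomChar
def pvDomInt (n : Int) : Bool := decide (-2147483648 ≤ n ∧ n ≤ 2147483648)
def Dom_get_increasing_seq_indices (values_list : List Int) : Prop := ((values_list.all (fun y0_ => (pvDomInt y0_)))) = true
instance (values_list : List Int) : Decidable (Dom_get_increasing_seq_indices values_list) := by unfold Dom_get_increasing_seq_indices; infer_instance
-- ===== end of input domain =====

-- B replaces the fused loop by a prefix-maximum table plus a selection pass (idiomatic decomposition, same O(n) cost).
-- ===== PORT A =====
def get_increasing_seq_indices (values_list : List Int) : List Int :=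
  ((PySem.List.enumerate values_list).foldl
    (fun (st : List Int × Int) iv =>
      if iv.2 > st.2 then (st.1 ++ [iv.1], iv.2) else st)
    ([], 0)).1

-- ===== PORT B =====
def get_increasing_seq_indices_alt (values_list : List Int) : List Int :=
  let prefix_max := (values_list.foldl
    (fun (st : List Int × Int) v => (st.1 ++ [st.2], max st.2 v)) ([], 0)).1
  (PySem.List.enumerate (values_list.zip prefix_max)).filterMap
    (fun p => if p.2.1 > p.2.2 then some p.1 else none)

-- ===== PRECONDITION & SPEC =====
def Spec_get_increasing_seq_indices (values_list : List Int) (out : List Int) : Prop := out = get_increasing_seq_indices_alt values_list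
instance (values_list : List Int) (out : List Int) : Decidable (Spec_get_increasing_seq_indices values_list out) := by unfold Spec_get_increasing_seq_indices; infer_instance

-- ===== CLAIM (what is proved, stated in full; the proofs are below) =====
def Claim_equal_get_increasing_seq_indices : Prop := ∀ (values_list : List Int), Dom_get_increasing_seq_indices values_list → Spec_get_increasing_seq_indices values_list (get_increasing_seq_indices values_list)

-- ===== LEMMAS AND PROOFS =====

/-- Common specification: indices (starting at `i`) whose value strictly exceeds
    the running maximum `m` of everything seen so far. -/
def pvSel : List Int → Int → Int → List Int
  | [], _, _ => []
  | v :: vs, i, m => (if v > m then [i] else []) ++ pvSel vs (i + 1) (max m v)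

theorem pvA_fold (vs : List Int) : ∀ (i : Int) (acc : List Int) (m : Int),
    ((PySem.List.enumerate vs i).foldl
      (fun (st : List Int × Int) iv =>
        if iv.2 > st.2 then (st.1 ++ [iv.1], iv.2) else st) (acc, m)).1
      = acc ++ pvSel vs i m := by
  induction vs with
  | nil => intro i acc m; simp [PySem.List.enumerate_nil, pvSel]
  | cons v vs ih =>
    intro i acc m
    rw [PySem.List.enumerate_cons]
    simp only [List.foldl_cons, pvSel]
    by_cases h : v > m
    · rw [if_pos h, if_pos h, ih, max_eq_right (le_of_lt h)]
      simp
    · rw [if_neg h, if_neg h, ih, max_eq_left (le_of_not_gt h)]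
      simp

/-- The exclusive prefix-maximum table starting from running max `m`. -/
def pvTab : List Int → Int → List Int
  | [], _ => []
  | v :: vs, m => m :: pvTab vs (max m v)

theorem pvB_tab (vs : List Int) : ∀ (acc : List Int) (m : Int),
    (vs.foldl (fun (st : List Int × Int) v => (st.1 ++ [st.2], max st.2 v)) (acc, m)).1
      = acc ++ pvTab vs m := by
  induction vs with
  | nil => intro acc m; simp [pvTab]
  | cons v vs ih => intro acc m; simp [List.foldl_cons, ih, pvTab]

theorem pvB_sel (vs : List Int) : ∀ (m i : Int),
    (PySem.List.enumerate (vs.zip (pvTab vs m)) i).filterMap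
        (fun p => if p.2.1 > p.2.2 then some p.1 else none)
      = pvSel vs i m := by
  induction vs with
  | nil => intro m i; simp [pvTab, PySem.List.enumerate_nil, pvSel]
  | cons v vs ih =>
    intro m i
    simp only [pvTab, List.zip_cons_cons, PySem.List.enumerate_cons,
      List.filterMap_cons, pvSel]
    by_cases h : v > m
    · rw [if_pos h, if_pos h, ih]; simp
    · rw [if_neg h, if_neg h, ih]; simp

-- ===== VERDICT (by name: the statement is the Claim_ definition above) =====
theorem get_increasing_seq_indices_spec : Claim_equal_get_increasing_seq_indices := by
  intro values_list _
  unfold Spec_get_increasing_seq_indices get_increasing_seq_indices get_increasing_seq_indices_alt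
  rw [pvA_fold, pvB_tab, List.nil_append]
  simp only []
  rw [List.nil_append, pvB_sel]
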